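-- pv_equiv track=rewrite | github.com/PegahEsg/UrbanEsg | urban.py | adjacency_estimation
-- ===== SOURCE A (Python) =====
-- def adjacency_estimation(stories):
--     adjacency=[]
--
--     for i,j in zip(stories,range(0,len(stories))):
--         if j%2==0:
--             adjacency.append([0,stories[j+1]])
--         else:
--             adjacency.append([stories[j-1],0])
--     return adjacency
-- ===== SOURCE B (Python) =====
-- def adjacency_estimation(stories):
--     it = iter(stories)
--     adjacency = []
--     for first in it:
--         second = next(it)
--         adjacency.append([0, second])
--         adjacency.append([first, 0])
--     return adjacency
-- ===== Notes on version B (the rewrite author's own statement) =====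
-- stated objective: alternative
-- what changed: B consumes the list pairwise (an iterator advanced twice per loop step), emitting both rows of each pair directly, with no index arithmetic and no parity branch.
import Mathlib
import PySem

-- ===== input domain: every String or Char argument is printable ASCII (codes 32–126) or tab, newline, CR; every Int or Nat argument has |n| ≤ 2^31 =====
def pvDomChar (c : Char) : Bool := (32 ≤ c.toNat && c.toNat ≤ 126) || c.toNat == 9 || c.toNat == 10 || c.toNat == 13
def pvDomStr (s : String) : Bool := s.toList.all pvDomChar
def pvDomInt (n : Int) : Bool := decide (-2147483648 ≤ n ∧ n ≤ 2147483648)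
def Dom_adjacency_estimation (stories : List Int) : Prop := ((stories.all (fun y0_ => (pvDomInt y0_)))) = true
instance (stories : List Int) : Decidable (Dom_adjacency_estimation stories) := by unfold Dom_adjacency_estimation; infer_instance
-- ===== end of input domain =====

-- B consumes the list pairwise (two elements taken from an iterator per loop step), emitting
-- both rows per pair, instead of A's zip over all indices with a parity branch; same order.


-- ===== PORT A =====
def adjacency_estimation (stories : List Int) : List (List Int) :=
  (stories.zip (PySem.List.pyRange 0 (PySem.List.len stories) 1)).foldl
    (fun adjacency ij =>
      if PySem.Int.mod ij.2 2 = 0 then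
        adjacency ++ [[0, PySem.List.pyGetD stories (ij.2 + 1) 0]]
      else
        adjacency ++ [[PySem.List.pyGetD stories (ij.2 - 1) 0, 0]])
    []

-- ===== PORT B =====
-- the loop: take two elements from the iterator per step. On an exhausted iterator after
-- 'first' the Python raises StopIteration (odd-length input, outside Pre_); the port
-- returns the accumulator there.
def pvLoopB (adjacency : List (List Int)) : List Int → List (List Int)
  | a :: b :: rest => pvLoopB ((adjacency ++ [[0, b]]) ++ [[a, 0]]) rest
  | _ => adjacency

def adjacency_estimation_alt (stories : List Int) : List (List Int) :=
  pvLoopB [] stories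

-- ===== PRECONDITION & SPEC =====
-- Pre_ excludes odd-length lists: there A raises IndexError on stories[j+1].
def Pre_adjacency_estimation (stories : List Int) : Prop := stories.length % 2 = 0
instance (stories : List Int) : Decidable (Pre_adjacency_estimation stories) := by
  unfold Pre_adjacency_estimation; infer_instance

def pvWitness_adjacency_estimation : List Int := [3, 7, 1, 4]

def Spec_adjacency_estimation (stories : List Int) (out : List (List Int)) : Prop := out = adjacency_estimation_alt stories
instance (stories : List Int) (out : List (List Int)) : Decidable (Spec_adjacency_estimation stories out) := by unfold Spec_adjacency_estimation; infer_instance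

-- ===== CLAIM (what is proved, stated in full; the proofs are below) =====
def Claim_equal_adjacency_estimation : Prop := ∀ (stories : List Int), Dom_adjacency_estimation stories → Pre_adjacency_estimation stories → Spec_adjacency_estimation stories (adjacency_estimation stories)

-- ===== LEMMAS AND PROOFS =====

-- the block A appends at index j
def pvGA (stories : List Int) (j : Int) : List (List Int) :=
  if PySem.Int.mod j 2 = 0 then [[0, PySem.List.pyGetD stories (j + 1) 0]]
  else [[PySem.List.pyGetD stories (j - 1) 0, 0]]

-- the same block with a Nat index
def pvRowsA (s : List Int) (n : Nat) : List (List Int) :=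
  if n % 2 = 0 then [[0, s.getD (n + 1) 0]] else [[s.getD (n - 1) 0, 0]]

lemma pvGA_nat (s : List Int) (n : Nat) : pvGA s (n : Int) = pvRowsA s n := by
  unfold pvGA pvRowsA
  rcases Nat.even_or_odd n with ⟨k, hk⟩ | ⟨k, hk⟩
  · have he : PySem.Int.mod (n : Int) 2 = 0 := by
      have h := PySem.Int.mod_natCast n 2
      have h1 : n % 2 = 0 := by omega
      rw [h1] at h; exact_mod_cast h
    have h1 : n % 2 = 0 := by omega
    have hc : (n : Int) + 1 = ((n + 1 : Nat) : Int) := by push_cast; ring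
    rw [if_pos he, if_pos h1, hc, PySem.List.pyGetD_natCast]
  · have ho : ¬ PySem.Int.mod (n : Int) 2 = 0 := by
      have h := PySem.Int.mod_natCast n 2
      have h1 : n % 2 = 1 := by omega
      rw [h1] at h
      have h2 : PySem.Int.mod (n : Int) 2 = 1 := by exact_mod_cast h
      omega
    have h1 : ¬ n % 2 = 0 := by omega
    have hc : (n : Int) - 1 = ((n - 1 : Nat) : Int) := by
      have : 1 ≤ n := by omega
      push_cast [this]; ring
    rw [if_neg ho, if_neg h1, hc, PySem.List.pyGetD_natCast]

lemma pvA_flatMap (stories : List Int) :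
    adjacency_estimation stories =
      (stories.zip (PySem.List.pyRange 0 (PySem.List.len stories) 1)).flatMap
        (fun ij => pvGA stories ij.2) := by
  unfold adjacency_estimation
  have h : (fun (adjacency : List (List Int)) (ij : Int × Int) =>
      if PySem.Int.mod ij.2 2 = 0 then
        adjacency ++ [[0, PySem.List.pyGetD stories (ij.2 + 1) 0]]
      else
        adjacency ++ [[PySem.List.pyGetD stories (ij.2 - 1) 0, 0]]) =
      (fun adjacency ij => adjacency ++ pvGA stories ij.2) := by
    funext acc ij
    unfold pvGA
    split <;> rfl
  rw [h, PySem.List.foldl_append_eq_flatMap]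
  simp

lemma pvA_range (stories : List Int) :
    adjacency_estimation stories =
      (List.range stories.length).flatMap (fun (j : Nat) => pvRowsA stories j) := by
  rw [pvA_flatMap]
  have hlen : (PySem.List.pyRange 0 (PySem.List.len stories) 1).length ≤ stories.length := by
    rw [PySem.List.len_eq, PySem.List.length_pyRange_one]; omega
  have hsnd := List.map_snd_zip hlen
  calc (stories.zip (PySem.List.pyRange 0 (PySem.List.len stories) 1)).flatMap
        (fun ij => pvGA stories ij.2)
      = (List.map Prod.snd
          (stories.zip (PySem.List.pyRange 0 (PySem.List.len stories) 1))).flatMap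
          (pvGA stories) := by
        rw [List.flatMap_map]
    _ = (PySem.List.pyRange 0 (PySem.List.len stories) 1).flatMap (pvGA stories) := by
        rw [hsnd]
    _ = (List.range stories.length).flatMap (fun (j : Nat) => pvRowsA stories j) := by
        rw [PySem.List.len_eq, PySem.List.pyRange_zero_natCast, List.flatMap_map]
        exact List.flatMap_congr (fun j _ => pvGA_nat stories j)

-- the consecutive disjoint pairs of the list (proof-side view of the loop's traversal)
def pvPairs : List Int → List (Int × Int)
  | a :: b :: rest => (a, b) :: pvPairs rest
  | _ => []

lemma pvLoopB_eq (s : List Int) : ∀ acc,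
    pvLoopB acc s = acc ++ (pvPairs s).flatMap (fun p => [[0, p.2], [p.1, 0]]) := by
  induction s using pvPairs.induct with
  | case1 a b rest ih =>
    intro acc
    rw [pvLoopB, pvPairs, ih]
    simp
  | case2 s h =>
    intro acc
    match s with
    | [] => simp [pvLoopB, pvPairs]
    | [a] => simp [pvLoopB, pvPairs]
    | a :: b :: rest => exact absurd rfl (h a b rest)

lemma pvB_flatMap (stories : List Int) :
    adjacency_estimation_alt stories =
      (pvPairs stories).flatMap (fun p => [[0, p.2], [p.1, 0]]) := by
  unfold adjacency_estimation_alt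
  rw [pvLoopB_eq]
  simp

lemma pvRowsA_shift (a b : Int) (t : List Int) (j : Nat) :
    pvRowsA (a :: b :: t) (j + 2) = pvRowsA t j := by
  unfold pvRowsA
  rcases Nat.even_or_odd j with ⟨k, hk⟩ | ⟨k, hk⟩
  · have h1 : (j + 2) % 2 = 0 := by omega
    have h2 : j % 2 = 0 := by omega
    rw [if_pos h1, if_pos h2]
    have : j + 2 + 1 = (j + 1) + 2 := by ring
    rw [this]; rfl
  · have h1 : ¬ (j + 2) % 2 = 0 := by omega
    have h2 : ¬ j % 2 = 0 := by omega
    rw [if_neg h1, if_neg h2]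
    have hj : 1 ≤ j := by omega
    have : j + 2 - 1 = (j - 1) + 2 := by omega
    rw [this]; rfl

lemma pvCore (s : List Int) (m : Nat) (hm : s.length = 2 * m) :
    (List.range (2 * m)).flatMap (fun j => pvRowsA s j) =
      (pvPairs s).flatMap (fun p => [[0, p.2], [p.1, 0]]) := by
  induction m generalizing s with
  | zero =>
    have : s = [] := List.length_eq_zero_iff.mp (by omega)
    subst this; simp [pvPairs]
  | succ m ih =>
    match s, hm with
    | a :: b :: t, hm =>
      have ht : t.length = 2 * m := by simpa using (by omega : (a :: b :: t).length - 2 = 2 * m)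
      have hr : 2 * (m + 1) = (2 * m + 1) + 1 := by omega
      rw [hr, List.range_succ_eq_map, List.range_succ_eq_map]
      simp only [List.flatMap_cons, List.flatMap_map]
      have h0 : pvRowsA (a :: b :: t) 0 = [[0, b]] := by simp [pvRowsA]
      have h1 : pvRowsA (a :: b :: t) 1 = [[a, 0]] := by simp [pvRowsA]
      calc pvRowsA (a :: b :: t) 0 ++
            (pvRowsA (a :: b :: t) (0 + 1) ++
              (List.range (2 * m)).flatMap fun j => pvRowsA (a :: b :: t) (j + 1 + 1))
          = [[0, b]] ++ ([[a, 0]] ++ (List.range (2 * m)).flatMap fun j => pvRowsA t j) := by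
            rw [h0]
            congr 1
            rw [h1]
            congr 1
            exact List.flatMap_congr (fun j _ => by
              have : j + 1 + 1 = j + 2 := by ring
              rw [this, pvRowsA_shift])
        _ = (pvPairs (a :: b :: t)).flatMap (fun p => [[0, p.2], [p.1, 0]]) := by
            rw [ih t ht]; simp [pvPairs]

-- ===== VERDICT (by name: the statement is the Claim_ definition above) =====
theorem adjacency_estimation_spec : Claim_equal_adjacency_estimation := by
  intro stories _ hpre
  unfold Spec_adjacency_estimation
  obtain ⟨m, hm⟩ : ∃ m, stories.length = 2 * m := by
    unfold Pre_adjacency_estimation at hpre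
    exact ⟨stories.length / 2, by omega⟩
  rw [pvA_range, pvB_flatMap, hm, pvCore stories m hm]
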